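-- pv_equiv track=rewrite | github.com/lounesitachi/GeneticAlgorithm | def_adetional.py | qi_define
-- ===== SOURCE A (Python) =====
-- def qi_define(list):
--     temp =[]
--     sum =0
--     for i in list :
--         temp1=[]
--         sum=sum+i[2]
--         temp1.append(i[0])
--         temp1.append(i[1])
--         temp1.append(i[2])
--         temp1.append(sum)
--         temp.append(temp1)
--     return temp
-- ===== SOURCE B (Python) =====
-- def qi_define(list):
--     # No running accumulator: each row's cumulative value is recomputed
--     # independently as the sum of the third fields over the prefix list[:i+1].
--     return [[row[0], row[1], row[2], sum(r[2] for r in list[:i + 1])]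
--             for i, row in enumerate(list)]
-- ===== Notes on version B (the rewrite author's own statement) =====
-- stated objective: alternative
-- what changed: B carries no running accumulator at all: each output row's cumulative value is recomputed independently as the sum of the third fields over the prefix slice list[:i+1], a quadratic brute-force recomputation instead of A's single-pass running sum.
import Mathlib
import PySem

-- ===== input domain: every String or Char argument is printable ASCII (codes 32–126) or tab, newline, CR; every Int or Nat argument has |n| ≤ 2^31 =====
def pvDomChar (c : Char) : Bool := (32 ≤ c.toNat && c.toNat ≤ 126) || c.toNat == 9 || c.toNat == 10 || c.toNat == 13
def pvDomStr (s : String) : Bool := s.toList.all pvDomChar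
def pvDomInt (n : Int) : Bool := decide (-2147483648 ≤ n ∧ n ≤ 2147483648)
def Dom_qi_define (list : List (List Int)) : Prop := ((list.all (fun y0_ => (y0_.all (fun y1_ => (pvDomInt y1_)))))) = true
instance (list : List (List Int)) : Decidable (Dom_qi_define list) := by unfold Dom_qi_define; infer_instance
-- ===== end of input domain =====

-- B recomputes each row's cumulative value independently as the sum over the prefix
-- slice list[:i+1] (quadratic, no running accumulator); A keeps a single running sum.
-- Return values proved equal on rows of length ≥ 3.

-- ===== PORT A =====
-- single loop: state = (temp, sum); each step appends [i[0], i[1], i[2], sum+i[2]]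
def qi_define (list : List (List Int)) : List (List Int) :=
  (list.foldl (fun (st : List (List Int) × Int) i =>
      let s := st.2 + PySem.List.pyGetD i 2 0
      (st.1 ++ [[PySem.List.pyGetD i 0 0, PySem.List.pyGetD i 1 0,
                 PySem.List.pyGetD i 2 0, s]], s))
    ([], 0)).1

-- ===== PORT B =====
-- sum(r[2] for r in prefix)
def qiThirdSum (pfx : List (List Int)) : Int :=
  (pfx.map (fun r => PySem.List.pyGetD r 2 0)).sum

-- comprehension over enumerate(list): each row paired with the sum over list[:i+1]
def qi_define_alt (list : List (List Int)) : List (List Int) :=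
  (PySem.List.enumerate list 0).map (fun p =>
    [PySem.List.pyGetD p.2 0 0, PySem.List.pyGetD p.2 1 0, PySem.List.pyGetD p.2 2 0,
     qiThirdSum (PySem.List.slice list none (some (p.1 + 1)))])

-- ===== PRECONDITION & SPEC =====
-- Python A indexes row[2] and so raises IndexError on any row of length < 3; B raises there too.
def Pre_qi_define (list : List (List Int)) : Prop :=
  ∀ row ∈ list, 3 ≤ row.length
instance (list : List (List Int)) : Decidable (Pre_qi_define list) := by
  unfold Pre_qi_define; infer_instance

def pvWitness_qi_define : List (List Int) := [[1, 2, 3], [4, 5, 6, 7]]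

def Spec_qi_define (list : List (List Int)) (out : List (List Int)) : Prop := out = qi_define_alt list
instance (list : List (List Int)) (out : List (List Int)) : Decidable (Spec_qi_define list out) := by unfold Spec_qi_define; infer_instance

-- ===== CLAIM (what is proved, stated in full; the proofs are below) =====
def Claim_equal_qi_define : Prop := ∀ (list : List (List Int)), Dom_qi_define list → Pre_qi_define list → Spec_qi_define list (qi_define list)

-- ===== LEMMAS AND PROOFS =====

-- reference shape: what A's loop produces from running sum s onward
def qiSpec (l : List (List Int)) (s : Int) : List (List Int) :=
  match l with
  | [] => []
  | r :: rs =>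
      [PySem.List.pyGetD r 0 0, PySem.List.pyGetD r 1 0, PySem.List.pyGetD r 2 0,
       s + PySem.List.pyGetD r 2 0] :: qiSpec rs (s + PySem.List.pyGetD r 2 0)

theorem qi_foldA (l : List (List Int)) (acc : List (List Int)) (s : Int) :
    (l.foldl (fun (st : List (List Int) × Int) i =>
        let t := st.2 + PySem.List.pyGetD i 2 0
        (st.1 ++ [[PySem.List.pyGetD i 0 0, PySem.List.pyGetD i 1 0,
                   PySem.List.pyGetD i 2 0, t]], t))
      (acc, s)).1 = acc ++ qiSpec l s := by
  induction l generalizing acc s with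
  | nil => simp [qiSpec]
  | cons r rs ih => simp [List.foldl, qiSpec, ih]

theorem qiSpec_length (l : List (List Int)) (s : Int) : (qiSpec l s).length = l.length := by
  induction l generalizing s with
  | nil => simp [qiSpec]
  | cons r rs ih => simp [qiSpec, ih]

theorem qiSpec_getElem (l : List (List Int)) (s : Int) (i : Nat) (h : i < l.length) :
    (qiSpec l s)[i]'(by rw [qiSpec_length]; exact h) =
      [PySem.List.pyGetD l[i] 0 0, PySem.List.pyGetD l[i] 1 0, PySem.List.pyGetD l[i] 2 0,
       s + qiThirdSum (l.take (i + 1))] := by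
  induction l generalizing s i with
  | nil => simp at h
  | cons r rs ih =>
      cases i with
      | zero => simp [qiSpec, qiThirdSum]
      | succ j =>
          have hj : j < rs.length := by simpa using h
          simp only [qiSpec, List.getElem_cons_succ, List.take_succ_cons]
          rw [ih _ _ hj]
          simp [qiThirdSum, add_assoc]

theorem qi_alt_eq_spec (l : List (List Int)) : qi_define_alt l = qiSpec l 0 := by
  unfold qi_define_alt
  apply List.ext_getElem
  · simp [PySem.List.length_enumerate, qiSpec_length]
  · intro i h1 h2
    have hi : i < l.length := by simpa [PySem.List.length_enumerate] using h1
    rw [List.getElem_map, PySem.List.getElem_enumerate]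
    rw [qiSpec_getElem l 0 i hi]
    have : ((0 : Int) + (i : Nat)) + 1 = ((i + 1 : Nat) : Int) := by push_cast; ring
    simp only [this, PySem.List.slice_to_natCast]
    simp

-- ===== VERDICT (by name: the statement is the Claim_ definition above) =====
theorem qi_define_spec : Claim_equal_qi_define := by
  intro l _ _
  unfold Spec_qi_define qi_define
  rw [qi_foldA, qi_alt_eq_spec]
  simp
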